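-- pv_equiv track=rewrite | github.com/microsoft/interwhen | interwhen/utils/maze_verifier.py | parse_maze_from_prompt
-- ===== SOURCE A (Python) =====
-- from typing import List, Tuple, Optional, Dict, Any
--
-- def parse_maze_from_prompt(prompt: str) -> Tuple[List[List[str]], Optional[Tuple[int, int]], Optional[Tuple[int, int]]]:
--     """
--     Parse maze from prompt. Returns (grid, start_pos, exit_pos).
--     Finds the LAST maze in the prompt (the actual one being solved).
--     """
--     lines = prompt.split('\n')
--     all_mazes = []
--     current_maze = []
--     in_maze = False
--
--     for line in lines:
--         stripped = line.strip()
--         if stripped.startswith('#') and all(c in '#XSEX ' for c in stripped):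
--             in_maze = True
--             current_maze.append(stripped)
--         elif in_maze:
--             if current_maze:
--                 all_mazes.append(current_maze)
--             current_maze = []
--             in_maze = False
--
--     if current_maze:
--         all_mazes.append(current_maze)
--
--     if not all_mazes:
--         return [], None, None
--
--     maze_lines = all_mazes[-1]
--     grid = [list(row) for row in maze_lines]
--     start_pos = None
--     exit_pos = None
--
--     for r, row in enumerate(grid):
--         for c, cell in enumerate(row):
--             if cell == 'S':
--                 start_pos = (r, c)
--             elif cell == 'E':
--                 exit_pos = (r, c)
--
--     return grid, start_pos, exit_pos
-- ===== SOURCE B (Python) =====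
-- def _is_maze_line(line):
--     s = line.strip()
--     return s[:1] == '#' and set(s) <= set('#XSE ')
--
--
-- def _last_pos(maze_lines, ch):
--     for r in range(len(maze_lines) - 1, -1, -1):
--         c = maze_lines[r].rfind(ch)
--         if c != -1:
--             return (r, c)
--     return None
--
--
-- def parse_maze_from_prompt(prompt):
--     """Backward scan: take the final contiguous maze block directly from the end,
--     and locate S/E by per-row rfind from the last row instead of nested
--     forward enumeration."""
--     lines = prompt.split('\n')
--     rev = lines[::-1]
--     k = 0
--     while k < len(rev) and not _is_maze_line(rev[k]):
--         k += 1
--     if k == len(rev):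
--         return [], None, None
--     block_rev = []
--     while k < len(rev) and _is_maze_line(rev[k]):
--         block_rev.append(rev[k].strip())
--         k += 1
--     maze_lines = block_rev[::-1]
--     grid = [list(row) for row in maze_lines]
--     return grid, _last_pos(maze_lines, 'S'), _last_pos(maze_lines, 'E')
-- ===== Notes on version B (the rewrite author's own statement) =====
-- stated objective: alternative
-- what changed: Instead of a forward pass accumulating every contiguous maze block and a nested forward enumeration where the last S/E seen wins, B extracts only the final contiguous block by scanning the lines from the end and locates S and E by a per-row rfind walking rows from the last one upward.
import Mathlib
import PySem

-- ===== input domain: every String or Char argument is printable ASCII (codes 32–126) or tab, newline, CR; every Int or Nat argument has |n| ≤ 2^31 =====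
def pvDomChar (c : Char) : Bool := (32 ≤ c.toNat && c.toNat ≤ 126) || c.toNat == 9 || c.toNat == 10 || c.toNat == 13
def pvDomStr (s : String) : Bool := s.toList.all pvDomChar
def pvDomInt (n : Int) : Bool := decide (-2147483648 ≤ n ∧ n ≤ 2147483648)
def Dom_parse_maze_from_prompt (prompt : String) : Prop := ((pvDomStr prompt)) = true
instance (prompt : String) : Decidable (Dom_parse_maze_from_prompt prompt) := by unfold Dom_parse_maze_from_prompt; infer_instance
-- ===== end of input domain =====

-- B replaces A's forward accumulation of every maze block (and its nested forward
-- last-wins scan for S/E) by a backward extraction of only the final block and a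
-- per-row rfind from the last row for S and E (objective: alternative).

-- ===== PORT A =====
-- A's maze-line predicate: stripped.startswith('#') and all chars in '#XSEX '
def pvIsMaze (line : String) : Bool :=
  let s := PySem.Str.strip line
  PySem.Str.startswith s "#" && s.toList.all (fun c => PySem.Chars.isIn [c] "#XSEX ".toList)

-- A's loop body: state = (all_mazes, current_maze, in_maze)
def pvStepA (st : List (List String) × List String × Bool) (line : String) :
    List (List String) × List String × Bool :=
  if pvIsMaze line then (st.1, st.2.1 ++ [PySem.Str.strip line], true)
  else if st.2.2 then
    ((if st.2.1.isEmpty then st.1 else st.1 ++ [st.2.1]), [], false)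
  else st

-- A's cell step: last S / last E wins (elif)
def pvCellA (se : Option (Int × Int) × Option (Int × Int)) (r c : Int) (cell : String) :
    Option (Int × Int) × Option (Int × Int) :=
  if cell == "S" then (some (r, c), se.2)
  else if cell == "E" then (se.1, some (r, c))
  else se

def pvFindSE_A (grid : List (List String)) :
    Option (Int × Int) × Option (Int × Int) :=
  (PySem.List.enumerate grid 0).foldl
    (fun se rr => (PySem.List.enumerate rr.2 0).foldl
      (fun se2 cc => pvCellA se2 rr.1 cc.1 cc.2) se) (none, none)

def parse_maze_from_prompt (prompt : String) :
    List (List String) × (Option (Int × Int)) × (Option (Int × Int)) :=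
  let lines := (PySem.Str.split? prompt "\n").getD []   -- sep ≠ "", always `some`
  let st := lines.foldl pvStepA ([], [], false)
  let all_mazes := if st.2.1.isEmpty then st.1 else st.1 ++ [st.2.1]
  if all_mazes.isEmpty then ([], none, none)
  else
    let maze_lines := all_mazes.getLastD []
    let grid := maze_lines.map (fun row => row.toList.map (fun c => String.ofList [c]))
    let se := pvFindSE_A grid
    (grid, se.1, se.2)

-- ===== PORT B =====
-- B's predicate: s[:1] == '#' and set(s) <= set('#XSE ')
def pvIsMazeB (line : String) : Bool :=
  let s := (PySem.Str.strip line).toList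
  s.take 1 == ['#'] && s.all (fun d => d ∈ "#XSE ".toList)

-- row.rfind(ch): largest index of ch, -1 if absent (exact for a char in a char list)
def pvRfind (ch : Char) (row : List Char) : Int :=
  match row.reverse.findIdx? (· == ch) with
  | some j => (row.length : Int) - 1 - (j : Int)
  | none => -1

-- B's _last_pos loop, r from the last row downward
def pvLastPosAux (ch : Char) : List (Int × List Char) → Option (Int × Int)
  | [] => none
  | (r, row) :: rest =>
      let c := pvRfind ch row
      if c ≠ -1 then some (r, c) else pvLastPosAux ch rest

def pvLastPos (ch : Char) (rows : List (List Char)) : Option (Int × Int) :=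
  pvLastPosAux ch (PySem.List.enumerate rows 0).reverse

def parse_maze_from_prompt_alt (prompt : String) :
    List (List String) × (Option (Int × Int)) × (Option (Int × Int)) :=
  let lines := (PySem.Str.split? prompt "\n").getD []
  let rev := lines.reverse
  let rest := rev.dropWhile (fun l => !pvIsMazeB l)
  if rest.isEmpty then ([], none, none)
  else
    let rows := ((rest.takeWhile pvIsMazeB).map (fun l => (PySem.Str.strip l).toList)).reverse
    let grid := rows.map (fun row => row.map (fun c => String.ofList [c]))
    (grid, pvLastPos 'S' rows, pvLastPos 'E' rows)

-- ===== PRECONDITION & SPEC =====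
def Spec_parse_maze_from_prompt (prompt : String) (out : List (List String) × (Option (Int × Int)) × (Option (Int × Int))) : Prop := out = parse_maze_from_prompt_alt prompt
instance (prompt : String) (out : List (List String) × (Option (Int × Int)) × (Option (Int × Int))) : Decidable (Spec_parse_maze_from_prompt prompt out) := by unfold Spec_parse_maze_from_prompt; infer_instance

-- ===== CLAIM (what is proved, stated in full; the proofs are below) =====
def Claim_equal_parse_maze_from_prompt : Prop := ∀ (prompt : String), Dom_parse_maze_from_prompt prompt → Spec_parse_maze_from_prompt prompt (parse_maze_from_prompt prompt)

-- ===== LEMMAS AND PROOFS =====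

-- the two maze-line predicates agree
lemma pvIsMazeB_eq (l : String) : pvIsMazeB l = pvIsMaze l := by
  rw [pvIsMazeB, pvIsMaze, Bool.eq_iff_iff]
  simp only [Bool.and_eq_true, List.all_eq_true]
  have hpfx : ((PySem.Str.strip l).toList.take 1 == ['#']) = true
      ↔ PySem.Str.startswith (PySem.Str.strip l) "#" = true := by
    simp only [PySem.Chars.startswith_iff, PySem.Str.startswith_eq]
    cases t : (PySem.Str.strip l).toList with
    | nil => simp
    | cons c cs =>
      show (([c] : List Char) == ['#']) = true ↔ ['#'] <+: c :: cs
      constructor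
      · intro h
        have hc : c = '#' := by simpa using h
        exact hc ▸ List.cons_prefix_cons.mpr ⟨rfl, List.nil_prefix⟩
      · intro h
        have hc : '#' = c := (List.cons_prefix_cons.mp h).1
        simp [← hc]
  have hmem : ∀ c : Char, (decide (c ∈ "#XSE ".toList) = true)
      ↔ PySem.Chars.isIn [c] "#XSEX ".toList = true := by
    intro c
    rw [PySem.Chars.isIn_iff_infix, List.singleton_infix_iff, decide_eq_true_iff]
    have e1 : "#XSE ".toList = ['#','X','S','E',' '] := by decide
    have e2 : "#XSEX ".toList = ['#','X','S','E','X',' '] := by decide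
    rw [e1, e2]
    simp only [List.mem_cons, List.not_mem_nil, or_false]
    constructor
    · rintro (h | h | h | h | h) <;> simp [h]
    · rintro (h | h | h | h | h | h) <;> simp [h]
  constructor
  · rintro ⟨a, b⟩
    exact ⟨hpfx.mp a, fun c hc => (hmem c).mp (b c hc)⟩
  · rintro ⟨a, b⟩
    exact ⟨hpfx.mpr a, fun c hc => (hmem c).mpr (b c hc)⟩

-- invariant of A's line loop, by right-to-left induction: current/in_maze track the
-- trailing maze run and the last collected block is the last contiguous run
def pvLastRun (lines : List String) : Option (List String) :=
  let rest := lines.reverse.dropWhile (fun l => !pvIsMaze l)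
  if rest.isEmpty then none
  else some (((rest.takeWhile pvIsMaze).map PySem.Str.strip).reverse)

lemma pvFoldA_spec (lines : List String) :
    (lines.foldl pvStepA ([], [], false)).2.1
        = ((lines.reverse.takeWhile pvIsMaze).map PySem.Str.strip).reverse
    ∧ (lines.foldl pvStepA ([], [], false)).2.2
        = !(lines.reverse.takeWhile pvIsMaze).isEmpty
    ∧ ((if (lines.foldl pvStepA ([], [], false)).2.1.isEmpty
          then (lines.foldl pvStepA ([], [], false)).1
          else (lines.foldl pvStepA ([], [], false)).1 ++ [(lines.foldl pvStepA ([], [], false)).2.1]).getLast?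
        = pvLastRun lines) := by
  induction lines using List.reverseRecOn with
  | nil => simp [pvLastRun]
  | append_singleton xs x ih =>
    obtain ⟨ih1, ih2, ih3⟩ := ih
    simp only [List.foldl_append, List.foldl_cons, List.foldl_nil,
      List.reverse_append, List.reverse_cons, List.reverse_nil, List.nil_append,
      List.singleton_append]
    by_cases hx : pvIsMaze x = true
    · have hstep : pvStepA (xs.foldl pvStepA ([], [], false)) x
          = ((xs.foldl pvStepA ([], [], false)).1,
             (xs.foldl pvStepA ([], [], false)).2.1 ++ [PySem.Str.strip x], true) := by
        rw [pvStepA, if_pos hx]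
      rw [hstep]
      refine ⟨?_, ?_, ?_⟩
      · simp [hx, ih1]
      · simp [hx]
      · have : ((xs.foldl pvStepA ([], [], false)).2.1 ++ [PySem.Str.strip x]).isEmpty = false := by
          simp
        rw [this]
        simp [pvLastRun, hx, ih1]
    · have hx' : pvIsMaze x = false := by simpa using hx
      have hlast : pvLastRun (xs ++ [x]) = pvLastRun xs := by
        simp [pvLastRun, hx']
      by_cases hin : (xs.foldl pvStepA ([], [], false)).2.2 = true
      · have htw : (xs.reverse.takeWhile pvIsMaze).isEmpty = false := by
          rw [ih2] at hin; simpa using hin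
        have hcur : (xs.foldl pvStepA ([], [], false)).2.1.isEmpty = false := by
          rw [ih1]
          simp only [List.isEmpty_eq_false_iff, ne_eq, List.reverse_eq_nil_iff,
            List.map_eq_nil_iff] at htw ⊢
          simpa using htw
        have hstep : pvStepA (xs.foldl pvStepA ([], [], false)) x
            = ((xs.foldl pvStepA ([], [], false)).1 ++ [(xs.foldl pvStepA ([], [], false)).2.1],
               [], false) := by
          rw [pvStepA]
          simp [hx', hin, hcur]
        rw [hstep]
        refine ⟨?_, ?_, ?_⟩
        · simp [hx']
        · simp [hx']
        · rw [hlast, ← ih3, hcur]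
          simp
      · have hin' : (xs.foldl pvStepA ([], [], false)).2.2 = false := by simpa using hin
        have htw : (xs.reverse.takeWhile pvIsMaze).isEmpty = true := by
          rw [ih2] at hin'; simpa using hin'
        have hstep : pvStepA (xs.foldl pvStepA ([], [], false)) x
            = xs.foldl pvStepA ([], [], false) := by
          rw [pvStepA]
          simp [hx', hin']
        rw [hstep]
        refine ⟨?_, ?_, ?_⟩
        · rw [ih1]
          simp [hx', List.isEmpty_iff.mp htw]
        · rw [ih2]
          simp [hx', List.isEmpty_iff.mp htw]
        · rw [hlast, ih3]

-- char-level flattened cells of a char grid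
def pvCellsC (rows : List (List Char)) : List (Int × Int × Char) :=
  (PySem.List.enumerate rows 0).flatMap
    (fun rr => (PySem.List.enumerate rr.2 0).map (fun cc => (rr.1, cc.1, cc.2)))

lemma pv_foldl_flatMap {α β σ : Type} (f : α → List β) (g : σ → β → σ) :
    ∀ (l : List α) (init : σ),
      (l.flatMap f).foldl g init = l.foldl (fun a x => (f x).foldl g a) init := by
  intro l
  induction l with
  | nil => intro init; rfl
  | cons x xs ih => intro init; simp [List.flatMap_cons, List.foldl_append, ih]

lemma pv_foldl_prod {τ α β : Type} (f : α → τ → α) (g : β → τ → β) :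
    ∀ (L : List τ) (a : α) (b : β),
      L.foldl (fun se t => (f se.1 t, g se.2 t)) (a, b) = (L.foldl f a, L.foldl g b) := by
  intro L
  induction L with
  | nil => intro a b; rfl
  | cons t L ih => intro a b; simp [ih]

lemma pv_foldl_lastwins {τ α : Type} (p : τ → Bool) (v : τ → α) :
    ∀ (L : List τ) (a : Option α),
      L.foldl (fun s t => if p t then some (v t) else s) a
        = (match L.reverse.find? p with
           | some t => some (v t)
           | none => a) := by
  intro L
  induction L with
  | nil => intro a; rfl
  | cons t L ih =>
    intro a
    rw [List.foldl_cons, ih]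
    rw [List.reverse_cons, List.find?_append]
    cases h : L.reverse.find? p with
    | some u => simp
    | none => by_cases hp : p t = true <;> simp [hp]

lemma pv_enumerate_map {α β : Type} (f : α → β) :
    ∀ (l : List α) (s : Int),
      PySem.List.enumerate (l.map f) s
        = (PySem.List.enumerate l s).map (fun p => (p.1, f p.2)) := by
  intro l
  induction l with
  | nil => intro s; simp [PySem.List.enumerate_nil]
  | cons x xs ih => intro s; simp [PySem.List.enumerate_cons, ih]

-- A's nested enumerate loops over the String grid = a fold over the char cells
lemma pv_nested_eq_cellsC {σ : Type} (h : σ → Int → Int → String → σ)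
    (rows : List (List Char)) (init : σ) :
    (PySem.List.enumerate (rows.map (fun row => row.map (fun c => String.ofList [c]))) 0).foldl
      (fun se rr => (PySem.List.enumerate rr.2 0).foldl
        (fun se2 cc => h se2 rr.1 cc.1 cc.2) se) init
    = (pvCellsC rows).foldl (fun a t => h a t.1 t.2.1 (String.ofList [t.2.2])) init := by
  rw [pvCellsC, pv_foldl_flatMap, pv_enumerate_map, List.foldl_map]
  congr 1
  funext a rr
  rw [pv_enumerate_map, List.foldl_map, List.foldl_map]

def pvS (s : Option (Int × Int)) (t : Int × Int × Char) : Option (Int × Int) :=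
  if t.2.2 == 'S' then some (t.1, t.2.1) else s
def pvE (e : Option (Int × Int)) (t : Int × Int × Char) : Option (Int × Int) :=
  if t.2.2 == 'E' then some (t.1, t.2.1) else e

lemma pv_ofList_eq_iff (c d : Char) :
    (String.ofList [c] == String.ofList [d]) = (c == d) := by
  by_cases h : c = d
  · simp [h]
  · simp [h]
    intro hc
    exact absurd (by simpa using congrArg String.toList hc) h

lemma pvCellA_split (se : Option (Int × Int) × Option (Int × Int)) (r c : Int) (cell : Char) :
    pvCellA se r c (String.ofList [cell]) = (pvS se.1 (r, c, cell), pvE se.2 (r, c, cell)) := by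
  rw [pvCellA, pvS, pvE]
  simp only [show ("S" : String) = String.ofList ['S'] from rfl,
    show ("E" : String) = String.ofList ['E'] from rfl, pv_ofList_eq_iff]
  by_cases hS : cell = 'S'
  · simp [hS]
  · by_cases hE : cell = 'E'
    · simp [hE]
    · simp [hS, hE]

-- A's S/E search, characterised as last-occurrence finds over the char cells
lemma pvFindSE_A_char (rows : List (List Char)) :
    pvFindSE_A (rows.map (fun row => row.map (fun c => String.ofList [c])))
      = (((pvCellsC rows).reverse.find? (fun t => t.2.2 == 'S')).map (fun t => (t.1, t.2.1)),
         ((pvCellsC rows).reverse.find? (fun t => t.2.2 == 'E')).map (fun t => (t.1, t.2.1))) := by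
  rw [pvFindSE_A, pv_nested_eq_cellsC pvCellA rows (none, none)]
  have hA : (fun (a : Option (Int × Int) × Option (Int × Int)) (t : Int × Int × Char) =>
      pvCellA a t.1 t.2.1 (String.ofList [t.2.2])) = (fun a t => (pvS a.1 t, pvE a.2 t)) := by
    funext a t
    rw [pvCellA_split]
  rw [hA, pv_foldl_prod]
  rw [show pvS = (fun s (t : Int × Int × Char) => if t.2.2 == 'S' then some (t.1, t.2.1) else s) from rfl,
     show pvE = (fun e (t : Int × Int × Char) => if t.2.2 == 'E' then some (t.1, t.2.1) else e) from rfl,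
     pv_foldl_lastwins, pv_foldl_lastwins]
  cases h : (pvCellsC rows).reverse.find? (fun t => t.2.2 == 'S') <;>
    cases h2 : (pvCellsC rows).reverse.find? (fun t => t.2.2 == 'E') <;> simp

-- per-row: reverse find over an enumerated row = rfind
lemma pv_row_rfind (ch : Char) (row : List Char) :
    (PySem.List.enumerate row 0).reverse.find? (fun cc => cc.2 == ch)
      = if pvRfind ch row = -1 then none else some (pvRfind ch row, ch) := by
  induction row using List.reverseRecOn with
  | nil => simp [PySem.List.enumerate_nil, pvRfind]
  | append_singleton xs x ih =>
    rw [PySem.List.enumerate_append, List.reverse_append]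
    have he : PySem.List.enumerate [x] ((0 : Int) + xs.length)
        = [((0 : Int) + xs.length, x)] := by
      simp [PySem.List.enumerate_cons, PySem.List.enumerate_nil]
    rw [he]
    simp only [List.reverse_cons, List.reverse_nil, List.nil_append, List.singleton_append]
    by_cases hx : x = ch
    · subst hx
      rw [List.find?_cons_of_pos (by simp)]
      have hfi : (xs ++ [x]).reverse.findIdx? (· == x) = some 0 := by
        rw [List.reverse_append]
        simp [List.findIdx?_cons]
      rw [pvRfind.eq_def, hfi]
      simp only [List.length_append, List.length_cons, List.length_nil]
      rw [if_neg (by push_cast; omega)]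
      simp only [Option.some.injEq, Prod.mk.injEq]
      exact ⟨by push_cast; omega, trivial⟩
    · rw [List.find?_cons_of_neg (by simpa using hx), ih]
      have hfi : (xs ++ [x]).reverse.findIdx? (· == ch)
          = (xs.reverse.findIdx? (· == ch)).map (· + 1) := by
        rw [List.reverse_append]
        simp [List.findIdx?_cons, hx]
      cases hj : xs.reverse.findIdx? (· == ch) with
      | none =>
        have ha : pvRfind ch (xs ++ [x]) = -1 := by
          rw [pvRfind.eq_def, hfi, hj]
          rfl
        have hb : pvRfind ch xs = -1 := by
          rw [pvRfind.eq_def, hj]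
        rw [ha, hb]
      | some j =>
        have hjlt : j < xs.length := by
          have h := List.findIdx?_eq_some_iff_findIdx_eq.mp hj
          simp only [List.length_reverse] at h
          omega
        have ha : pvRfind ch (xs ++ [x]) = (xs.length : Int) - 1 - (j : Int) := by
          rw [pvRfind.eq_def, hfi, hj]
          simp only [Option.map_some, List.length_append, List.length_cons, List.length_nil]
          push_cast
          ring
        have hb : pvRfind ch xs = (xs.length : Int) - 1 - (j : Int) := by
          rw [pvRfind.eq_def, hj]
        rw [ha, hb]

-- B's row-by-row backward search = last-occurrence find over the reversed char cells
lemma pvLastPosAux_spec (ch : Char) :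
    ∀ (L : List (Int × List Char)),
      pvLastPosAux ch L
        = ((L.flatMap (fun rr => ((PySem.List.enumerate rr.2 0).map
              (fun cc => (rr.1, cc.1, cc.2))).reverse)).find? (fun t => t.2.2 == ch)).map
            (fun t => (t.1, t.2.1)) := by
  intro L
  induction L with
  | nil => simp [pvLastPosAux]
  | cons p rest ih =>
    obtain ⟨r, row⟩ := p
    rw [List.flatMap_cons, List.find?_append]
    have hrow : ((PySem.List.enumerate row 0).map (fun cc => (r, cc.1, cc.2))).reverse.find?
          (fun t : Int × Int × Char => t.2.2 == ch)
        = ((PySem.List.enumerate row 0).reverse.find? (fun cc => cc.2 == ch)).map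
            (fun cc => (r, cc.1, cc.2)) := by
      rw [← List.map_reverse, List.find?_map]
      rfl
    rw [hrow, pv_row_rfind]
    simp only [pvLastPosAux]
    by_cases hc : pvRfind ch row = -1
    · rw [if_neg (by simp [hc]), if_pos hc]
      simpa using ih
    · rw [if_pos hc, if_neg hc]
      simp

lemma pvLastPos_spec (ch : Char) (rows : List (List Char)) :
    pvLastPos ch rows
      = ((pvCellsC rows).reverse.find? (fun t => t.2.2 == ch)).map (fun t => (t.1, t.2.1)) := by
  rw [pvLastPos, pvLastPosAux_spec, pvCellsC, List.reverse_flatMap]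
  rfl

-- ===== VERDICT (by name: the statement is the Claim_ definition above) =====
theorem parse_maze_from_prompt_spec : Claim_equal_parse_maze_from_prompt := by
  intro prompt _
  unfold Spec_parse_maze_from_prompt
  rw [parse_maze_from_prompt, parse_maze_from_prompt_alt]
  simp only [show pvIsMazeB = pvIsMaze from funext pvIsMazeB_eq]
  obtain ⟨h1, h2, h3⟩ := pvFoldA_spec ((PySem.Str.split? prompt "\n").getD [])
  set lines := (PySem.Str.split? prompt "\n").getD [] with hl
  set rest := lines.reverse.dropWhile (fun l => !pvIsMaze l) with hr
  set allm := (if (lines.foldl pvStepA ([], [], false)).2.1.isEmpty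
      then (lines.foldl pvStepA ([], [], false)).1
      else (lines.foldl pvStepA ([], [], false)).1 ++ [(lines.foldl pvStepA ([], [], false)).2.1])
    with hall
  by_cases hrest : rest.isEmpty = true
  · have hlr : pvLastRun lines = none := by rw [pvLastRun, ← hr, if_pos hrest]
    rw [hlr] at h3
    have hallnil := List.getLast?_eq_none_iff.mp h3
    simp [hallnil, hrest]
  · have hrest' : rest.isEmpty = false := by simpa using hrest
    have hlr : pvLastRun lines
        = some (((rest.takeWhile pvIsMaze).map PySem.Str.strip).reverse) := by
      rw [pvLastRun, ← hr]
      simp [hrest']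
    rw [hlr] at h3
    have hempty : allm.isEmpty = false := by
      cases hbig : allm with
      | nil => rw [hbig] at h3; simp at h3
      | cons a l => simp
    have hlastD : allm.getLastD []
        = ((rest.takeWhile pvIsMaze).map PySem.Str.strip).reverse := by
      rw [List.getLastD_eq_getLast?, h3]
      rfl
    simp only [hempty, Bool.false_eq_true, if_false, hrest', hlastD]
    set rows := (((rest.takeWhile pvIsMaze).map PySem.Str.strip).reverse).map String.toList with hrows
    have hgr : (((rest.takeWhile pvIsMaze).map PySem.Str.strip).reverse).map
          (fun row => row.toList.map (fun c => String.ofList [c]))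
        = rows.map (fun row => row.map (fun c => String.ofList [c])) := by
      rw [hrows, List.map_map]
      rfl
    have hrows2 : ((rest.takeWhile pvIsMaze).map (fun l => (PySem.Str.strip l).toList)).reverse
        = rows := by
      rw [hrows, List.map_reverse, List.map_map]
      rfl
    rw [hgr, hrows2, pvFindSE_A_char, pvLastPos_spec, pvLastPos_spec]
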